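-- pv_equiv track=rewrite | github.com/ANYhackerfort/vision-research-gps | components/gps+picture_merger/gps_pose_plot.py | _last_int_in_stem
-- ===== SOURCE A (Python) =====
-- from typing import Dict, List, Optional, Tuple
--
-- def _last_int_in_stem(stem: str) -> Optional[int]:
--     # extract last integer group from a filename stem
--     cur = ""
--     last = None
--     for ch in stem:
--         if ch.isdigit():
--             cur += ch
--         else:
--             if cur:
--                 last = int(cur)
--                 cur = ""
--     if cur:
--         last = int(cur)
--     return last
-- ===== SOURCE B (Python) =====
-- import re
--
-- def _last_int_in_stem(stem: str):
--     # collect all maximal digit runs, then take the last one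
--     matches = re.findall(r'\d+', stem)
--     return int(matches[-1]) if matches else None
-- ===== Notes on version B (the rewrite author's own statement) =====
-- stated objective: idiomatic
-- what changed: Replaces the manual character loop that tracks a current digit-run accumulator and a running most-recent value with re.findall collecting all maximal digit runs at once, then selecting the final run and converting it.
import Mathlib
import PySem

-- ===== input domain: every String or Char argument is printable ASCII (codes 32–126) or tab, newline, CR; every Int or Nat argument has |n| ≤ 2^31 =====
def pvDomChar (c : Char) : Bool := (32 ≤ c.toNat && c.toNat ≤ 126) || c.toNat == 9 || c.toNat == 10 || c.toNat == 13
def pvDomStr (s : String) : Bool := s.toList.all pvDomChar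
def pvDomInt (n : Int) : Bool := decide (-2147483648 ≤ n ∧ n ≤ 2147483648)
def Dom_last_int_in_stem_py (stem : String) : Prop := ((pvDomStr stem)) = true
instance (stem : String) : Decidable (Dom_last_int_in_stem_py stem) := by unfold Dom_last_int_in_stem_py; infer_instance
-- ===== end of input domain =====

-- B replaces A's single-pass accumulator/last-tracking loop with collect-all-maximal-digit-runs
-- (re.findall(r'\d+')) then take-the-last; idiomatic, same cost, return value proved equal.

-- int(cs) for a nonempty all-digit cs (the only way either Python calls int); exact there.
def pvToInt (cs : List Char) : Int := (PySem.Int.ofChars? cs).getD 0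

-- ===== PORT A =====
-- loop state: (cur, last); cur += ch / flush on non-digit, final flush after the loop
def stepA (st : List Char × Option Int) (ch : Char) : List Char × Option Int :=
  if PySem.Chars.isdigit ch then (st.1 ++ [ch], st.2)
  else if st.1 ≠ [] then ([], some (pvToInt st.1)) else st

def last_int_in_stem_py (stem : String) : Option Int :=
  let st := stem.toList.foldl stepA ([], none)
  if st.1 ≠ [] then some (pvToInt st.1) else st.2

-- ===== PORT B =====
-- port of re.findall(r'\d+', stem): the list of maximal digit runs, in order (exact for \d+ on ASCII)
def digitRuns : List Char → List Char → List (List Char)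
  | [], acc => if acc = [] then [] else [acc]
  | c :: cs, acc =>
      if PySem.Chars.isdigit c then digitRuns cs (acc ++ [c])
      else if acc = [] then digitRuns cs [] else acc :: digitRuns cs []

def last_int_in_stem_py_alt (stem : String) : Option Int :=
  ((digitRuns stem.toList []).getLast?).map pvToInt

-- ===== PRECONDITION & SPEC =====
def Spec_last_int_in_stem_py (stem : String) (out : Option Int) : Prop := out = last_int_in_stem_py_alt stem
instance (stem : String) (out : Option Int) : Decidable (Spec_last_int_in_stem_py stem out) := by unfold Spec_last_int_in_stem_py; infer_instance

-- ===== CLAIM (what is proved, stated in full; the proofs are below) =====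
def Claim_equal_last_int_in_stem_py : Prop := ∀ (stem : String), Dom_last_int_in_stem_py stem → Spec_last_int_in_stem_py stem (last_int_in_stem_py stem)

-- ===== LEMMAS AND PROOFS =====

theorem loop_runs (l : List Char) : ∀ (cur : List Char) (last : Option Int),
    (let st := l.foldl stepA (cur, last);
     if st.1 ≠ [] then some (pvToInt st.1) else st.2)
      = (((digitRuns l cur).getLast?).map pvToInt).elim last some := by
  induction l with
  | nil =>
      intro cur last
      by_cases h : cur = [] <;> simp [digitRuns, h]
  | cons c cs ih =>
      intro cur last
      by_cases hd : PySem.Chars.isdigit c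
      · simpa [List.foldl_cons, stepA, hd, digitRuns] using ih (cur ++ [c]) last
      · by_cases h : cur = []
        · simpa [List.foldl_cons, stepA, hd, h, digitRuns] using ih [] last
        · have hstep : stepA (cur, last) c = ([], some (pvToInt cur)) := by
            simp [stepA, hd, h]
          have hruns : digitRuns (c :: cs) cur = cur :: digitRuns cs [] := by
            simp [digitRuns, hd, h]
          rw [List.foldl_cons, hstep, hruns, ih [] (some (pvToInt cur))]
          rcases hrest : (digitRuns cs []).getLast? with _ | r
          · simp [List.getLast?_eq_none_iff.mp hrest]
          · rcases List.getLast?_eq_some_iff.mp hrest with ⟨l', hl'⟩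
            rw [hl', show cur :: (l' ++ [r]) = (cur :: l') ++ [r] from rfl,
              List.getLast?_concat]
            simp

-- ===== VERDICT (by name: the statement is the Claim_ definition above) =====
theorem last_int_in_stem_py_spec : Claim_equal_last_int_in_stem_py := by
  intro stem _
  unfold Spec_last_int_in_stem_py last_int_in_stem_py last_int_in_stem_py_alt
  rw [loop_runs]
  rcases (digitRuns stem.toList []).getLast? with _ | r <;> simp
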